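-- pv_equiv track=rewrite | github.com/Shilenkovv/Algorithms_PyGen_bg | 9_Reinforcement_of_Material/9_1_5.py | most_frequent_digit_length
-- ===== SOURCE A (Python) =====
-- from collections import Counter
-- from math import floor, log10
--
-- def most_frequent_digit_length(nums: list[int]) -> int:
--     cntr = Counter(list(map(lambda x: floor(log10(x)) + 1, nums)))
--
--     max_cnt = -float('inf')
--     for k in sorted(cntr):
--         if cntr.get(k) >= max_cnt:
--             max_k = k
--             max_cnt = cntr.get(k)
--     return max_k
-- ===== SOURCE B (Python) =====
-- from math import floor, log10
--
--
-- def most_frequent_digit_length(nums: list[int]) -> int: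
--     # sort the digit lengths, then find the mode by scanning consecutive equal runs;
--     # ascending order + '>=' update makes the larger length win count ties.
--     lengths = sorted(floor(log10(x)) + 1 for x in nums)
--     best_len = 0
--     best_cnt = 0
--     i = 0
--     n = len(lengths)
--     while i < n:
--         j = i
--         while j < n and lengths[j] == lengths[i]:
--             j += 1
--         if j - i >= best_cnt:
--             best_len, best_cnt = lengths[i], j - i
--         i = j
--     return best_len
-- ===== Notes on version B (the rewrite author's own statement) =====
-- stated objective: alternative
-- what changed: Replaces the Counter hash-count plus sorted-keys selection loop with a sort-then-run-length scan: the digit lengths are sorted and the mode is found by walking consecutive equal runs, updating on >= so the larger length wins count ties.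
import Mathlib
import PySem

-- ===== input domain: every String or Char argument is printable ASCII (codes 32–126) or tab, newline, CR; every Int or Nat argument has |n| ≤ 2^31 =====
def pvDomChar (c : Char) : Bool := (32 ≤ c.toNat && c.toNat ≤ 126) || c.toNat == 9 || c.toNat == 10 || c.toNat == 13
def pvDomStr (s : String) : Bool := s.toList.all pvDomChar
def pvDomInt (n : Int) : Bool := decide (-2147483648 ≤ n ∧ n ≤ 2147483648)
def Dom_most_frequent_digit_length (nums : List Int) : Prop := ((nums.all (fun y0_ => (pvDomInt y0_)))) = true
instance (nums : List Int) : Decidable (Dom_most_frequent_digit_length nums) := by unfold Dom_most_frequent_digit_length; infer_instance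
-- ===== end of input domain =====

-- B replaces A's Counter + sorted-keys selection loop with a sort-then-run-length mode scan (alternative algorithm, same cost).

-- ===== PORT A =====
-- floor(log10(x)) + 1 is a float computation with no PySem port; for integers 1 ≤ x ≤ 2^31
-- it is EXACTLY Nat.log 10 x + 1 (the decimal digit count), which is how it is ported here.
def pyDigLenA (x : Int) : Int := (Nat.log 10 x.toNat : Int) + 1

-- the body of A's 'for k in sorted(cntr)' loop; state none = (max_k unbound, max_cnt = -inf)
def stepA (cntr : PySem.Dict Int Int) (st : Option (Int × Int)) (k : Int) : Option (Int × Int) :=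
  match st with
  | none => some (k, cntr.getD k 0)          -- cntr.get(k) >= -inf always holds
  | some (mk, mc) => if cntr.getD k 0 ≥ mc then some (k, cntr.getD k 0) else some (mk, mc)

def most_frequent_digit_length (nums : List Int) : Int :=
  let cntr := PySem.Dict.counter (nums.map pyDigLenA)
  let st := (PySem.List.sorted cntr.keys (fun k => k) false).foldl (stepA cntr) none
  match st with
  | some (mk, _) => mk
  | none => 0                                 -- UnboundLocalError in Python: excluded by Pre_

-- ===== PORT B =====
-- Source B uses the same floor(log10(x)) + 1 expression as A; ported the same way (exact for x ≥ 1)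
def pyDigLenB (x : Int) : Int := (Nat.log 10 x.toNat : Int) + 1

-- the outer while loop of Source B: scan consecutive equal runs of the sorted list
def bScan : List Int → Int → Int → Int
  | [], bl, _ => bl
  | x :: rest, bl, bc =>
    let run : Int := 1 + (rest.takeWhile (fun y => y == x)).length
    let rest' := rest.dropWhile (fun y => y == x)
    if run ≥ bc then bScan rest' x run else bScan rest' bl bc
termination_by ls _ _ => ls.length
decreasing_by
  all_goals
    have := List.length_dropWhile_le (fun y => y == x) rest
    simp only [List.length_cons]
    omega

def most_frequent_digit_length_alt (nums : List Int) : Int :=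
  bScan (PySem.List.sorted (nums.map pyDigLenB) (fun k => k) false) 0 0

-- ===== PRECONDITION & SPEC =====
-- A raises ValueError (math domain error of log10) on any element ≤ 0 and
-- UnboundLocalError on the empty list; Pre_ excludes exactly those inputs.
def Pre_most_frequent_digit_length (nums : List Int) : Prop :=
  nums ≠ [] ∧ ∀ x ∈ nums, 1 ≤ x
instance (nums : List Int) : Decidable (Pre_most_frequent_digit_length nums) := by
  unfold Pre_most_frequent_digit_length; infer_instance
def pvWitness_most_frequent_digit_length : List Int := [3, 42, 7, 500]

def Spec_most_frequent_digit_length (nums : List Int) (out : Int) : Prop := out = most_frequent_digit_length_alt nums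
instance (nums : List Int) (out : Int) : Decidable (Spec_most_frequent_digit_length nums out) := by unfold Spec_most_frequent_digit_length; infer_instance

-- ===== CLAIM (what is proved, stated in full; the proofs are below) =====
def Claim_equal_most_frequent_digit_length : Prop := ∀ (nums : List Int), Dom_most_frequent_digit_length nums → Pre_most_frequent_digit_length nums → Spec_most_frequent_digit_length nums (most_frequent_digit_length nums)

-- ===== LEMMAS AND PROOFS =====

-- counting elements of a run decomposition
lemma count_flatMap_replicate (c : Int → Nat) (v : Int) :
    ∀ ks : List Int, ks.Nodup →
      (ks.flatMap (fun k => List.replicate (c k) k)).count v = if v ∈ ks then c v else 0 := by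
  intro ks
  induction ks with
  | nil => simp
  | cons k t ih =>
    intro hnd
    rw [List.flatMap_cons, List.count_append, ih hnd.of_cons]
    rcases eq_or_ne v k with rfl | hne
    · have : v ∉ t := (List.nodup_cons.mp hnd).1
      simp [this]
    · simp [List.count_replicate, hne, Ne.symm hne, List.mem_cons]

-- a run decomposition in increasing key order is weakly sorted
lemma pairwise_flatMap_replicate (c : Int → Nat) :
    ∀ ks : List Int, ks.Pairwise (· < ·) →
      (ks.flatMap (fun k => List.replicate (c k) k)).Pairwise (fun a b : Int => a ≤ b) := by
  intro ks
  induction ks with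
  | nil => simp
  | cons k t ih =>
    intro hp
    rw [List.flatMap_cons, List.pairwise_append]
    refine ⟨List.pairwise_replicate.mpr (Or.inr (le_refl k)), ih hp.of_cons, ?_⟩
    intro a ha b hb
    obtain rfl := List.eq_of_mem_replicate ha
    obtain ⟨k', hk', hb'⟩ := List.mem_flatMap.mp hb
    obtain rfl := List.eq_of_mem_replicate hb'
    exact le_of_lt (List.rel_of_pairwise_cons hp hk')

-- the sorted multiset IS the concatenation of its runs in increasing key order
lemma sorted_eq_runs (L : List Int) :
    PySem.List.sorted L (fun k => k) false =
      (PySem.List.sorted (PySem.Set.ofList L) (fun k => k) false).flatMap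
        (fun k => List.replicate (L.count k) k) := by
  set ks := PySem.List.sorted (PySem.Set.ofList L) (fun k => k) false with hks
  have hperm : ks.Perm (PySem.Set.ofList L) := PySem.List.sorted_perm _ _ _
  have hnd : ks.Nodup := hperm.nodup_iff.mpr (PySem.Set.nodup_ofList L)
  have hmem : ∀ v : Int, v ∈ ks ↔ v ∈ L := by
    intro v
    rw [hperm.mem_iff, PySem.Set.mem_ofList]
  apply PySem.List.sorted_id_eq_of_perm_of_pairwise
  · rw [List.perm_iff_count]
    intro v
    rw [count_flatMap_replicate _ _ _ hnd]
    by_cases h : v ∈ L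
    · simp [(hmem v).mpr h]
    · simp [List.count_eq_zero_of_not_mem h]
  · exact pairwise_flatMap_replicate _ _ (PySem.List.sorted_ofList_pairwise_lt L)

-- one step of B's run scan: a whole run is consumed at once
lemma bScan_run (k : Int) (c : Nat) (hc : 1 ≤ c) (rest : List Int)
    (hrest : ∀ y ∈ rest, k < y) (bl bc : Int) :
    bScan (List.replicate c k ++ rest) bl bc =
      if (c : Int) ≥ bc then bScan rest k c else bScan rest bl bc := by
  obtain ⟨c', rfl⟩ : ∃ c', c = c' + 1 := ⟨c - 1, by omega⟩
  have hrep : List.replicate (c' + 1) k ++ rest = k :: (List.replicate c' k ++ rest) := by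
    rw [List.replicate_succ]; rfl
  have htw : List.takeWhile (fun y => y == k) rest = [] := by
    cases rest with
    | nil => rfl
    | cons y t =>
      have : (y == k) = false := by
        have := hrest y (List.mem_cons_self)
        simp; omega
      simp [this]
  have hdw : List.dropWhile (fun y => y == k) rest = rest := by
    cases rest with
    | nil => rfl
    | cons y t =>
      have : (y == k) = false := by
        have := hrest y (List.mem_cons_self)
        simp; omega
      simp [this]
  have hall : ∀ x ∈ List.replicate c' k, (fun y => y == k) x = true := by
    intro x hx; simp [List.eq_of_mem_replicate hx]
  rw [hrep, bScan]
  simp only [List.takeWhile_append_of_pos hall, List.dropWhile_append_of_pos hall,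
    htw, hdw, List.length_append, List.length_replicate, List.length_nil]
  have : (1 : Int) + ((c' + 0 : Nat) : Int) = ((c' + 1 : Nat) : Int) := by push_cast; ring
  rw [this]

-- the simulation: B's run scan over the runs = A's fold over the sorted distinct keys
lemma scan_sim (cntr : PySem.Dict Int Int) (c : Int → Nat)
    (hcnt : ∀ k, cntr.getD k 0 = (c k : Int)) :
    ∀ ks : List Int, ks.Pairwise (· < ·) → (∀ k ∈ ks, 1 ≤ c k) →
      ∀ mk mc : Int, 0 ≤ mc →
        bScan (ks.flatMap (fun k => List.replicate (c k) k)) mk mc =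
          (match ks.foldl (stepA cntr) (some (mk, mc)) with
            | some (a, _) => a | none => 0) := by
  intro ks
  induction ks with
  | nil => intro _ _ mk mc _; simp [bScan]
  | cons k t ih =>
    intro hp hpos mk mc hmc
    have hrest : ∀ y ∈ t.flatMap (fun k => List.replicate (c k) k), k < y := by
      intro y hy
      obtain ⟨k', hk', hy'⟩ := List.mem_flatMap.mp hy
      obtain rfl := List.eq_of_mem_replicate hy'
      exact List.rel_of_pairwise_cons hp hk'
    rw [List.flatMap_cons, bScan_run k (c k) (hpos k List.mem_cons_self) _ hrest,
      List.foldl_cons]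
    have hstep : stepA cntr (some (mk, mc)) k =
        if (c k : Int) ≥ mc then some (k, (c k : Int)) else some (mk, mc) := by
      simp [stepA, hcnt k]
    rw [hstep]
    by_cases hcond : (c k : Int) ≥ mc
    · rw [if_pos hcond, if_pos hcond]
      exact ih hp.of_cons (fun x hx => hpos x (List.mem_cons_of_mem _ hx)) k (c k)
        (by positivity)
    · rw [if_neg hcond, if_neg hcond]
      exact ih hp.of_cons (fun x hx => hpos x (List.mem_cons_of_mem _ hx)) mk mc hmc

-- ===== VERDICT (by name: the statement is the Claim_ definition above) =====
theorem most_frequent_digit_length_spec : Claim_equal_most_frequent_digit_length := by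
  intro nums _hdom hpre
  obtain ⟨hne, hpos⟩ := hpre
  unfold Spec_most_frequent_digit_length most_frequent_digit_length most_frequent_digit_length_alt
  simp only []
  have hmap : nums.map pyDigLenB = nums.map pyDigLenA := rfl
  set L := nums.map pyDigLenA with hL
  have hkeys : (PySem.Dict.counter L).keys = PySem.Set.ofList L := PySem.Dict.keys_counter L
  have hcnt : ∀ k, (PySem.Dict.counter L).getD k 0 = (L.count k : Int) := fun k =>
    PySem.Dict.getD_counter L k
  rw [hmap, hkeys, sorted_eq_runs L]
  set ks := PySem.List.sorted (PySem.Set.ofList L) (fun k => k) false with hks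
  have hpw : ks.Pairwise (· < ·) := PySem.List.sorted_ofList_pairwise_lt L
  have hmem : ∀ v : Int, v ∈ ks ↔ v ∈ L := by
    intro v
    rw [(PySem.List.sorted_perm _ _ _).mem_iff, PySem.Set.mem_ofList]
  have hcpos : ∀ k ∈ ks, 1 ≤ L.count k := fun k hk =>
    List.count_pos_iff.mpr ((hmem k).mp hk)
  cases hksc : ks with
  | nil =>
    exfalso
    have hLne : L ≠ [] := by
      intro h
      exact hne (List.map_eq_nil_iff.mp (hL ▸ h))
    obtain ⟨v, hv⟩ := List.exists_mem_of_ne_nil L hLne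
    have : v ∈ ks := (hmem v).mpr hv
    rw [hksc] at this
    exact absurd this (List.not_mem_nil)
  | cons k0 kt =>
    rw [List.flatMap_cons, List.foldl_cons]
    have h0 : stepA (PySem.Dict.counter L) none k0 = some (k0, (L.count k0 : Int)) := by
      simp [stepA, hcnt k0]
    have hk0 : k0 ∈ ks := by rw [hksc]; exact List.mem_cons_self
    rw [bScan_run k0 (L.count k0) (hcpos k0 hk0) _ ?_ 0 0, h0]
    · rw [if_pos (by positivity)]
      exact (scan_sim (PySem.Dict.counter L) L.count hcnt kt
        (hksc ▸ hpw).of_cons (fun x hx => hcpos x (hksc ▸ List.mem_cons_of_mem _ hx))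
        k0 (L.count k0) (by positivity)).symm
    · intro y hy
      obtain ⟨k', hk', hy'⟩ := List.mem_flatMap.mp hy
      obtain rfl := List.eq_of_mem_replicate hy'
      exact List.rel_of_pairwise_cons (hksc ▸ hpw) hk'
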